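-- pv_equiv track=rewrite | github.com/VorosDavidVasvari/Mozi | Main.py | RequestSeats
-- ===== SOURCE A (Python) =====
-- def RequestSeats(seatAmount: int, seats: list) -> int:
--     availableNumSeatsInRow: int = 0
--
--     for i in range(len(seats)):
--         for j in range(len(seats[i])):
--             for k in range(len(seats[i][j])):
--                 if seats[i][j][k] == 'E':
--                     availableNumSeatsInRow += 1
--                 else:
--                     availableNumSeatsInRow = 0
--
--                 if availableNumSeatsInRow == seatAmount:
--                     return i + 1
--
--     return -1
-- ===== SOURCE B (Python) =====
-- def RequestSeats(seatAmount: int, seats: list) -> int: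
--     # Substring search instead of a running counter: encode every seat as
--     # '1' (empty) / '0' (occupied) into one flat bit-string, locate the first
--     # occurrence of '1'*seatAmount with str.find, then map the flat index at
--     # which that run completes back to its row by subtracting row sizes.
--     if seatAmount <= 0:
--         return -1
--     bits = "".join('1' if s == 'E' else '0' for row in seats for sub in row for s in sub)
--     if seatAmount > len(bits):
--         return -1
--     pos = bits.find('1' * seatAmount)
--     if pos == -1:
--         return -1
--     end = pos + seatAmount - 1  # flat index where the run completes
--     for i, row in enumerate(seats):
--         n = sum(len(sub) for sub in row)
--         if end < n:
--             return i + 1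
--         end -= n
--     return -1  # unreachable
-- ===== Notes on version B (the rewrite author's own statement) =====
-- stated objective: alternative
-- what changed: Replaced the running consecutive-seat counter by substring search: the seats are encoded as a flat '1'/'0' bit-string, str.find locates the first occurrence of '1'*seatAmount, and the flat index where that run completes is mapped back to its row by subtracting per-row sizes.
-- intended difference: When seatAmount == 0 and some seat is not 'E', A returns the row of the first occupied seat (its counter resets to 0, accidentally equalling the request); B returns -1, the intended answer since a non-positive request names no run of empty seats and an occupied seat's row is never a valid answer. — e.g. on RequestSeats(0, [[["F"]]]): A returns 1, B returns -1
import Mathlib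
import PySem

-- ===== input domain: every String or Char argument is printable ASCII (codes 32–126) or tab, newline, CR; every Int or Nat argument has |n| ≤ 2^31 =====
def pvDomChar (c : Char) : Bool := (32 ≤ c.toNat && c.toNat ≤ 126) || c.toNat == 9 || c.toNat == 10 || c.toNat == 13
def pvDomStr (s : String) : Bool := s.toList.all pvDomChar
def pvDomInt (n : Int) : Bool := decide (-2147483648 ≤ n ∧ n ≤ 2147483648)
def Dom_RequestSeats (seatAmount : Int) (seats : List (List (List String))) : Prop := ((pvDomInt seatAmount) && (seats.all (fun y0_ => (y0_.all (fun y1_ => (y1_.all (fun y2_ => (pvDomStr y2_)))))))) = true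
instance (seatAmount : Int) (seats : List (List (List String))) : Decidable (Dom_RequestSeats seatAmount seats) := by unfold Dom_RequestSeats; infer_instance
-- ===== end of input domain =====

-- B replaces A's running counter by substring search: encode seats as a flat '1'/'0' string,
-- find '1'*seatAmount, and map the flat index where the run completes back to its row.

-- ===== PORT A =====
-- innermost loop over seats[i][j]: none = early return fired, some c = counter after the loop
def reqK (seatAmount : Int) (xs : List String) (cnt : Int) : Option Int :=
  match xs with
  | [] => some cnt
  | s :: rest =>
    let c := if s == "E" then cnt + 1 else 0
    if c == seatAmount then none else reqK seatAmount rest c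

-- middle loop over seats[i]
def reqJ (seatAmount : Int) (row : List (List String)) (cnt : Int) : Option Int :=
  match row with
  | [] => some cnt
  | sub :: rest =>
    match reqK seatAmount sub cnt with
    | none => none
    | some c => reqJ seatAmount rest c

-- outer loop over seats, carrying the row index i
def reqI (seatAmount : Int) (rows : List (List (List String))) (i : Int) (cnt : Int) : Int :=
  match rows with
  | [] => -1
  | row :: rest =>
    match reqJ seatAmount row cnt with
    | none => i + 1
    | some c => reqI seatAmount rest (i + 1) c

def RequestSeats (seatAmount : Int) (seats : List (List (List String))) : Int :=
  reqI seatAmount seats 0 0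

-- ===== PORT B =====
-- bits = "".join('1' if s == 'E' else '0' for row in seats for sub in row for s in sub)
def bBits (seats : List (List (List String))) : List Char :=
  seats.flatMap (fun row => row.flatMap (fun sub => sub.map (fun s => if s == "E" then '1' else '0')))

-- for i, row in enumerate(seats): n = sum(len(sub) for sub in row); if end < n: return i+1; end -= n
def bRowOf (rows : List (List (List String))) (i : Int) (e : Int) : Int :=
  match rows with
  | [] => -1
  | row :: rest =>
    let n : Int := (row.map (fun sub => (sub.length : Int))).sum
    if e < n then i + 1 else bRowOf rest (i + 1) (e - n)

def RequestSeats_alt (seatAmount : Int) (seats : List (List (List String))) : Int :=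
  if seatAmount ≤ 0 then -1
  else
    let bits := bBits seats
    if seatAmount > (bits.length : Int) then -1
    else
      let pos := PySem.Chars.find bits (List.replicate seatAmount.toNat '1')
      if pos = -1 then -1
      else bRowOf seats 0 (pos + seatAmount - 1)

-- ===== PRECONDITION & SPEC =====
-- When seatAmount == 0 and some seat is not 'E', A returns the row of the first occupied seat
-- (its counter resets to 0, accidentally equalling the request); B returns -1, the intended answer:
-- a non-positive request names no run of empty seats, so an occupied seat's row is never a valid answer.
def D_RequestSeats (seatAmount : Int) (seats : List (List (List String))) : Prop :=
  seatAmount = 0 ∧ (seats.all (fun row => row.all (fun sub => sub.all (fun s => s == "E")))) = false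
instance (seatAmount : Int) (seats : List (List (List String))) : Decidable (D_RequestSeats seatAmount seats) := by unfold D_RequestSeats; infer_instance

def Spec_RequestSeats (seatAmount : Int) (seats : List (List (List String))) (out : Int) : Prop := ¬ D_RequestSeats seatAmount seats → out = RequestSeats_alt seatAmount seats
instance (seatAmount : Int) (seats : List (List (List String))) (out : Int) : Decidable (Spec_RequestSeats seatAmount seats out) := by unfold Spec_RequestSeats; infer_instance

def pvDiffWitness_RequestSeats : Int × List (List (List String)) := (0, [[["F"]]])
def pvDiffWitnessOut_RequestSeats : Int × Int := (1, -1)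

-- ===== CLAIM (what is proved, stated in full; the proofs are below) =====
def Claim_unchanged_RequestSeats : Prop := ∀ (seatAmount : Int) (seats : List (List (List String))), Dom_RequestSeats seatAmount seats → Spec_RequestSeats seatAmount seats (RequestSeats seatAmount seats)
def Claim_changed_RequestSeats : Prop := Dom_RequestSeats (pvDiffWitness_RequestSeats.1) (pvDiffWitness_RequestSeats.2) ∧ D_RequestSeats (pvDiffWitness_RequestSeats.1) (pvDiffWitness_RequestSeats.2) ∧ RequestSeats (pvDiffWitness_RequestSeats.1) (pvDiffWitness_RequestSeats.2) = pvDiffWitnessOut_RequestSeats.1 ∧ RequestSeats_alt (pvDiffWitness_RequestSeats.1) (pvDiffWitness_RequestSeats.2) = pvDiffWitnessOut_RequestSeats.2 ∧ pvDiffWitnessOut_RequestSeats.1 ≠ pvDiffWitnessOut_RequestSeats.2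
def Claim_exact_RequestSeats : Prop := ∀ (seatAmount : Int) (seats : List (List (List String))), Dom_RequestSeats seatAmount seats → D_RequestSeats seatAmount seats → RequestSeats seatAmount seats ≠ RequestSeats_alt seatAmount seats

-- ===== LEMMAS AND PROOFS =====

theorem find_zero_of_prefix (s pat : List Char) (h : pat <+: s) :
    PySem.Chars.find s pat = 0 := by
  have hin : pat <:+: s := h.isInfix
  have h0 : 0 ≤ PySem.Chars.find s pat := (PySem.Chars.find_nonneg_iff s pat).mpr hin
  have hs := PySem.Chars.find_spec (s := s) (sub := pat) h0
  by_contra hne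
  have ht : 0 < (PySem.Chars.find s pat).toNat := by omega
  exact hs.2 0 ht (by simpa using h)

theorem no_prefix_in_blocked (k r : Nat) (hr : r < k) (c : Char) (hc : c ≠ '1')
    (rest : List Char) (j : Nat) (hj : j ≤ r) :
    ¬ (List.replicate k '1' <+: (List.replicate r '1' ++ c :: rest).drop j) := by
  intro h
  have hdrop : (List.replicate r '1' ++ c :: rest).drop j
      = List.replicate (r - j) '1' ++ c :: rest := by
    rw [List.drop_append_of_le_length (by simpa using hj), List.drop_replicate]
  rw [hdrop] at h
  have hlen : k ≤ (List.replicate (r - j) '1' ++ c :: rest).length := by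
    simpa using h.length_le
  have hidx : r - j < k := by omega
  have := h.getElem (i := r - j) (by simpa using hidx)
  rw [List.getElem_replicate] at this
  have hat : (List.replicate (r - j) '1' ++ c :: rest)[r - j]'(by omega) = c := by
    rw [List.getElem_append_right (by simp)]
    simp
  exact hc ((this.trans hat).symm)

theorem drop_blocked (r m : Nat) (c : Char) (rest : List Char) :
    (List.replicate r '1' ++ c :: rest).drop (r + 1 + m) = rest.drop m := by
  have h : List.replicate r '1' ++ c :: rest = (List.replicate r '1' ++ [c]) ++ rest := by simp
  rw [h, List.drop_append]
  rw [List.drop_eq_nil_of_le (by simp)]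
  rw [List.nil_append]
  congr 1
  simp

theorem find_blocked_step (k r : Nat) (hr : r < k) (c : Char) (hc : c ≠ '1') (rest : List Char) :
    PySem.Chars.find (List.replicate r '1' ++ c :: rest) (List.replicate k '1')
      = if PySem.Chars.find rest (List.replicate k '1') = -1 then -1
        else (r : Int) + 1 + PySem.Chars.find rest (List.replicate k '1') := by
  set pat := List.replicate k '1' with hpat
  set s := List.replicate r '1' ++ c :: rest with hs
  by_cases hg : PySem.Chars.find rest pat = -1
  · rw [if_pos hg]
    rw [PySem.Chars.find_eq_neg_one_iff]
    intro hin
    have : PySem.Chars.isIn pat s = true := (PySem.Chars.isIn_iff_infix pat s).mpr hin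
    obtain ⟨j, hj⟩ := (PySem.Chars.exists_prefix_drop_iff_isIn pat s).mpr this
    by_cases hjr : j ≤ r
    · exact no_prefix_in_blocked k r hr c hc rest j hjr hj
    · have hj' : pat <+: rest.drop (j - (r + 1)) := by
        have : r + 1 + (j - (r + 1)) = j := by omega
        rw [← this] at hj
        rwa [drop_blocked] at hj
      have : PySem.Chars.isIn pat rest = true :=
        (PySem.Chars.exists_prefix_drop_iff_isIn pat rest).mp ⟨_, hj'⟩
      exact absurd hg ((PySem.Chars.find_ne_neg_one_iff rest pat).mpr
        ((PySem.Chars.isIn_iff_infix pat rest).mp this))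
  · rw [if_neg hg]
    have hg0 : 0 ≤ PySem.Chars.find rest pat := by
      have := PySem.Chars.neg_one_le_find rest pat
      omega
    obtain ⟨hgp, hgmin⟩ := PySem.Chars.find_spec (s := rest) (sub := pat) hg0
    set g := (PySem.Chars.find rest pat).toNat with hgdef
    have hsp : pat <+: s.drop (r + 1 + g) := by rw [hs, drop_blocked]; exact hgp
    have hf0 : 0 ≤ PySem.Chars.find s pat := by
      rw [PySem.Chars.find_nonneg_iff]
      have : PySem.Chars.isIn pat s = true :=
        (PySem.Chars.exists_prefix_drop_iff_isIn pat s).mp ⟨_, hsp⟩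
      exact (PySem.Chars.isIn_iff_infix pat s).mp this
    obtain ⟨hfp, hfmin⟩ := PySem.Chars.find_spec (s := s) (sub := pat) hf0
    set f := (PySem.Chars.find s pat).toNat with hfdef
    have hfr : r + 1 ≤ f := by
      by_contra hlt
      exact no_prefix_in_blocked k r hr c hc rest f (by omega) hfp
    have hfle : f ≤ r + 1 + g := by
      by_contra hgt
      exact hfmin (r + 1 + g) (by omega) hsp
    have hge : r + 1 + g ≤ f := by
      by_contra hgt
      have : pat <+: rest.drop (f - (r + 1)) := by
        have he : r + 1 + (f - (r + 1)) = f := by omega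
        rw [← he, drop_blocked] at hfp
        exact hfp
      exact hgmin (f - (r + 1)) (by omega) this
    have : f = r + 1 + g := by omega
    omega

def scan01 (k : Nat) (bits : List Char) (r : Nat) : Option Nat :=
  match bits with
  | [] => none
  | c :: rest =>
    let r' := if c = '1' then r + 1 else 0
    if r' = k then some 0 else (scan01 k rest r').map (· + 1)

theorem scan01_cons_one (k : Nat) (rest : List Char) (r : Nat) :
    scan01 k ('1' :: rest) r
      = if r + 1 = k then some 0 else (scan01 k rest (r + 1)).map (· + 1) := by
  rw [scan01]
  simp

theorem scan01_cons_not (k : Nat) (c : Char) (hc : c ≠ '1') (rest : List Char) (r : Nat) :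
    scan01 k (c :: rest) r
      = if 0 = k then some 0 else (scan01 k rest 0).map (· + 1) := by
  rw [scan01]
  simp [hc]

def reqScan (seatAmount : Int) (flat : List (String × Int)) (run : Int) : Int :=
  match flat with
  | [] => -1
  | (ch, i) :: rest =>
    let r := if ch == "E" then run + 1 else 0
    if r == seatAmount then i + 1 else reqScan seatAmount rest r

theorem reqScan_cons_E (sa : Int) (i : Int) (rest : List (String × Int)) (run : Int) :
    reqScan sa (("E", i) :: rest) run
      = if run + 1 = sa then i + 1 else reqScan sa rest (run + 1) := by
  rw [reqScan]
  simp

theorem reqScan_cons_not (sa : Int) (s : String) (hs : s ≠ "E") (i : Int)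
    (rest : List (String × Int)) (run : Int) :
    reqScan sa ((s, i) :: rest) run
      = if 0 = sa then i + 1 else reqScan sa rest 0 := by
  rw [reqScan]
  simp [hs]

def flatOf (rows : List (List (List String))) (i : Int) : List (String × Int) :=
  (PySem.List.enumerate rows i).flatMap
    (fun p => p.2.flatMap (fun sub => sub.map (fun ch => (ch, p.1))))

def bit (p : String × Int) : Char := if p.1 == "E" then '1' else '0'

theorem reqScan_eq_scan01 (k : Nat) (hk : 0 < k) (flat : List (String × Int)) (rn : Nat) :
    reqScan (k : Int) flat (rn : Int) =
      (match scan01 k (flat.map bit) rn with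
       | none => -1
       | some t => match flat[t]? with | some p => p.2 + 1 | none => -1) := by
  induction flat generalizing rn with
  | nil => simp [reqScan, scan01]
  | cons p rest ih =>
    obtain ⟨s, i⟩ := p
    rw [List.map_cons]
    by_cases hs : s = "E"
    · subst hs
      have hb : bit ("E", i) = '1' := by simp [bit]
      rw [hb, scan01_cons_one, reqScan_cons_E]
      by_cases h : rn + 1 = k
      · have h' : (rn : Int) + 1 = (k : Int) := by exact_mod_cast congrArg (Nat.cast : Nat → Int) h
        rw [if_pos h', if_pos h]
        simp
      · have h' : ¬ ((rn : Int) + 1 = (k : Int)) := fun hh => h (by exact_mod_cast hh)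
        rw [if_neg h', if_neg h]
        have hcast : (rn : Int) + 1 = ((rn + 1 : Nat) : Int) := by push_cast; ring
        rw [hcast, ih (rn + 1)]
        cases scan01 k (rest.map bit) (rn + 1) with
        | none => simp
        | some t => simp
    · have hb : bit (s, i) = '0' := by simp [bit, hs]
      rw [hb, scan01_cons_not k '0' (by decide) _ rn, reqScan_cons_not _ s hs]
      have hk0 : ¬ ((0 : Int) = (k : Int)) := by
        intro hh
        have : (0 : Nat) = k := by exact_mod_cast hh
        omega
      rw [if_neg hk0, if_neg (by omega : ¬ (0 = k))]
      have hcast : (0 : Int) = ((0 : Nat) : Int) := by norm_num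
      rw [hcast, ih 0]
      cases scan01 k (rest.map bit) 0 with
      | none => simp
      | some t => simp

theorem scan01_find (k : Nat) (hk : 0 < k) (bits : List Char) (r : Nat) (hr : r < k) :
    scan01 k bits r =
      (if PySem.Chars.find (List.replicate r '1' ++ bits) (List.replicate k '1') = -1 then none
       else some ((PySem.Chars.find (List.replicate r '1' ++ bits) (List.replicate k '1')).toNat + k - 1 - r)) := by
  induction bits generalizing r with
  | nil =>
    rw [scan01]
    rw [if_pos]
    rw [PySem.Chars.find_eq_neg_one_iff]
    intro h
    have := h.length_le
    simp at this
    omega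
  | cons c rest ih =>
    rw [scan01]
    by_cases hc : c = '1'
    · rw [if_pos hc]
      subst hc
      have hlist : List.replicate r '1' ++ '1' :: rest = List.replicate (r + 1) '1' ++ rest := by
        rw [List.replicate_succ' ]
        simp
      by_cases hk1 : r + 1 = k
      · rw [if_pos hk1]
        have hpref : List.replicate k '1' <+: List.replicate r '1' ++ '1' :: rest := by
          rw [hlist, ← hk1]
          exact List.prefix_append _ _
        rw [find_zero_of_prefix _ _ hpref]
        rw [if_neg (by omega)]
        congr 1
        omega
      · rw [if_neg hk1]
        rw [ih (r + 1) (by omega)]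
        rw [hlist]
        by_cases hf : PySem.Chars.find (List.replicate (r + 1) '1' ++ rest) (List.replicate k '1') = -1
        · simp [hf]
        · have h0 : 0 ≤ PySem.Chars.find (List.replicate (r + 1) '1' ++ rest) (List.replicate k '1') := by
            have := PySem.Chars.neg_one_le_find (List.replicate (r + 1) '1' ++ rest) (List.replicate k '1')
            omega
          obtain ⟨hp, -⟩ := PySem.Chars.find_spec (s := List.replicate (r + 1) '1' ++ rest) (sub := List.replicate k '1') h0
          have hwin : k ≤ (List.replicate (r + 1) '1' ++ rest).length - (PySem.Chars.find (List.replicate (r + 1) '1' ++ rest) (List.replicate k '1')).toNat := by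
            have := hp.length_le
            simpa using this
          simp only [if_neg hf, Option.map_some]
          congr 1
          omega
    · simp only [if_neg hc]
      have hk0 : ¬ (0 = k) := by omega
      simp only [if_neg hk0]
      rw [ih 0 hk]
      simp only [List.replicate_zero, List.nil_append]
      rw [find_blocked_step k r hr c hc rest]
      by_cases hf : PySem.Chars.find rest (List.replicate k '1') = -1
      · simp [hf]
      · have h0 : 0 ≤ PySem.Chars.find rest (List.replicate k '1') := by
          have := PySem.Chars.neg_one_le_find rest (List.replicate k '1')
          omega
        simp only [if_neg hf]
        rw [if_neg (by omega)]
        simp only [Option.map_some]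
        congr 1
        omega

theorem flatOf_map_bit (rows : List (List (List String))) (i : Int) :
    (flatOf rows i).map bit = bBits rows := by
  induction rows generalizing i with
  | nil => simp [flatOf, PySem.List.enumerate_nil, bBits]
  | cons row rest ih =>
    unfold flatOf bBits
    rw [PySem.List.enumerate_cons]
    simp only [List.flatMap_cons, List.map_append]
    congr 1
    · simp [List.map_flatMap, List.map_map, Function.comp_def, bit]
    · exact ih (i + 1)

theorem flatOf_map_fst (rows : List (List (List String))) (i : Int) :
    (flatOf rows i).map Prod.fst = rows.flatMap (fun row => row.flatMap (fun sub => sub)) := by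
  induction rows generalizing i with
  | nil => simp [flatOf, PySem.List.enumerate_nil]
  | cons row rest ih =>
    unfold flatOf
    rw [PySem.List.enumerate_cons]
    simp only [List.flatMap_cons, List.map_append]
    congr 1
    · simp [List.map_flatMap, List.map_map, Function.comp_def]
    · exact ih (i + 1)

theorem flatOf_snd_ge (rows : List (List (List String))) (i : Int) :
    ∀ p ∈ flatOf rows i, i ≤ p.2 := by
  induction rows generalizing i with
  | nil => simp [flatOf, PySem.List.enumerate_nil]
  | cons row rest ih =>
    unfold flatOf
    rw [PySem.List.enumerate_cons]
    simp only [List.flatMap_cons]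
    intro p hp
    rcases List.mem_append.mp hp with h | h
    · obtain ⟨sub, -, hm⟩ := List.mem_flatMap.mp h
      obtain ⟨ch, -, rfl⟩ := List.mem_map.mp hm
      simp
    · have := ih (i + 1) p h
      omega

theorem bRowOf_eq (rows : List (List (List String))) (i : Int) (t : Nat)
    (ht : t < (flatOf rows i).length) :
    bRowOf rows i (t : Int)
      = (match (flatOf rows i)[t]? with | some p => p.2 + 1 | none => -1) := by
  induction rows generalizing i t with
  | nil => simp [flatOf, PySem.List.enumerate_nil] at ht
  | cons row rest ih =>
    have hsplit : flatOf (row :: rest) i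
        = row.flatMap (fun sub => sub.map (fun ch => (ch, i))) ++ flatOf rest (i + 1) := by
      unfold flatOf
      rw [PySem.List.enumerate_cons]
      simp [List.flatMap_cons]
    set block := row.flatMap (fun sub => sub.map (fun ch => (ch, i))) with hblock
    have hn : ((row.map (fun sub => (sub.length : Int))).sum) = (block.length : Int) := by
      rw [hblock]
      simp only [List.length_flatMap]
      rw [Nat.cast_list_sum, List.map_map]
      simp [Function.comp_def]
    rw [bRowOf, hn]
    rw [hsplit] at ht ⊢
    by_cases hlt : t < block.length
    · rw [if_pos (by exact_mod_cast hlt)]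
      rw [List.getElem?_append_left hlt]
      have hmem : block[t]'hlt ∈ List.flatMap (fun sub => List.map (fun ch => (ch, i)) sub) row := by
        rw [← hblock]
        exact List.getElem_mem _
      obtain ⟨sub, -, hm⟩ := List.mem_flatMap.mp hmem
      obtain ⟨ch, -, hp⟩ := List.mem_map.mp hm
      have hp2 : (block[t]'hlt).2 = i := by rw [← hp]
      rw [List.getElem?_eq_getElem hlt]
      simp [hp2]
    · rw [if_neg (by simp; omega)]
      have h2 : (t : Int) - (block.length : Int) = ((t - block.length : Nat) : Int) := by omega
      rw [h2]
      have ht' : t - block.length < (flatOf rest (i + 1)).length := by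
        rw [List.length_append] at ht
        omega
      rw [ih (i + 1) (t - block.length) ht']
      rw [List.getElem?_append_right (by omega)]

theorem reqScan_neg (sa : Int) (hsa : sa < 0) (flat : List (String × Int)) (r : Int) (hr : 0 ≤ r) :
    reqScan sa flat r = -1 := by
  induction flat generalizing r with
  | nil => rfl
  | cons p rest ih =>
    obtain ⟨s, i⟩ := p
    by_cases hs : s = "E"
    · subst hs
      rw [reqScan_cons_E, if_neg (by omega)]
      exact ih (r + 1) (by omega)
    · rw [reqScan_cons_not _ s hs, if_neg (by omega)]
      exact ih 0 (by omega)

theorem reqScan_allE (flat : List (String × Int)) (hall : ∀ p ∈ flat, p.1 = "E")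
    (r : Int) (hr : 0 ≤ r) : reqScan 0 flat r = -1 := by
  induction flat generalizing r with
  | nil => rfl
  | cons p rest ih =>
    obtain ⟨s, i⟩ := p
    have hs : s = "E" := hall (s, i) (by simp)
    subst hs
    rw [reqScan_cons_E, if_neg (by omega)]
    exact ih (fun p hp => hall p (by simp [hp])) (r + 1) (by omega)

theorem reqScan_zero_hit (flat : List (String × Int)) (hidx : ∀ p ∈ flat, 0 ≤ p.2)
    (hex : ∃ p ∈ flat, p.1 ≠ "E") (r : Int) (hr : 0 ≤ r) : 1 ≤ reqScan 0 flat r := by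
  induction flat generalizing r with
  | nil => simp at hex
  | cons p rest ih =>
    obtain ⟨s, i⟩ := p
    by_cases hs : s = "E"
    · subst hs
      rw [reqScan_cons_E, if_neg (by omega)]
      have hex' : ∃ p ∈ rest, p.1 ≠ "E" := by
        obtain ⟨q, hq, hne⟩ := hex
        rcases List.mem_cons.mp hq with rfl | hm
        · exact absurd rfl hne
        · exact ⟨q, hm, hne⟩
      exact ih (fun p hp => hidx p (by simp [hp])) hex' (r + 1) (by omega)
    · rw [reqScan_cons_not _ s hs, if_pos rfl]
      have : 0 ≤ i := hidx (s, i) (by simp)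
      omega

theorem reqK_scan (sa : Int) (xs : List String) (cnt i : Int) (rest : List (String × Int)) :
    reqScan sa (xs.map (fun ch => (ch, i)) ++ rest) cnt
      = (match reqK sa xs cnt with
         | none => i + 1
         | some c => reqScan sa rest c) := by
  induction xs generalizing cnt with
  | nil => simp [reqK]
  | cons s t ih =>
    simp only [List.map_cons, List.cons_append, reqScan, reqK, beq_iff_eq]
    by_cases h : (if s = "E" then cnt + 1 else 0) = sa
    · simp [h]
    · simp [h, ih]

theorem reqJ_scan (sa : Int) (row : List (List String)) (cnt i : Int) (rest : List (String × Int)) :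
    reqScan sa (row.flatMap (fun sub => sub.map (fun ch => (ch, i))) ++ rest) cnt
      = (match reqJ sa row cnt with
         | none => i + 1
         | some c => reqScan sa rest c) := by
  induction row generalizing cnt with
  | nil => simp [reqJ]
  | cons sub t ih =>
    simp only [List.flatMap_cons, List.append_assoc, reqJ]
    rw [reqK_scan]
    cases reqK sa sub cnt with
    | none => rfl
    | some c => exact ih c

theorem reqI_scan (sa : Int) (rows : List (List (List String))) (i cnt : Int) :
    reqScan sa (flatOf rows i) cnt = reqI sa rows i cnt := by
  induction rows generalizing i cnt with
  | nil => simp [flatOf, PySem.List.enumerate_nil, reqScan, reqI]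
  | cons row t ih =>
    unfold flatOf
    rw [PySem.List.enumerate_cons]
    simp only [List.flatMap_cons, reqI]
    rw [reqJ_scan]
    cases reqJ sa row cnt with
    | none => rfl
    | some c => exact ih (i + 1) c

theorem allE_of_all (seats : List (List (List String)))
    (hall : (seats.all (fun row => row.all (fun sub => sub.all (fun s => s == "E")))) = true) :
    ∀ p ∈ flatOf seats 0, p.1 = "E" := by
  intro p hp
  have hm : p.1 ∈ (flatOf seats 0).map Prod.fst := List.mem_map_of_mem hp
  rw [flatOf_map_fst] at hm
  obtain ⟨row, hrow, hm2⟩ := List.mem_flatMap.mp hm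
  obtain ⟨sub, hsub, hin⟩ := List.mem_flatMap.mp hm2
  have h1 := List.all_eq_true.mp hall row hrow
  have h2 := List.all_eq_true.mp h1 sub hsub
  have h3 := List.all_eq_true.mp h2 p.1 hin
  simpa using h3

theorem exE_of_not_all (seats : List (List (List String)))
    (hfalse : (seats.all (fun row => row.all (fun sub => sub.all (fun s => s == "E")))) = false) :
    ∃ p ∈ flatOf seats 0, p.1 ≠ "E" := by
  have h : ∃ row ∈ seats, ∃ sub ∈ row, ∃ s ∈ sub, ¬ s = "E" := by simpa using hfalse
  obtain ⟨row, hrow, sub, hsub, s, hin, hs⟩ := h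
  have hm : s ∈ (flatOf seats 0).map Prod.fst := by
    rw [flatOf_map_fst]
    exact List.mem_flatMap.mpr ⟨row, hrow, List.mem_flatMap.mpr ⟨sub, hsub, hin⟩⟩
  obtain ⟨p, hp, hfst⟩ := List.mem_map.mp hm
  exact ⟨p, hp, by rw [hfst]; exact hs⟩

theorem reqScan_eq_scan01_zero (k : Nat) (hk : 0 < k) (flat : List (String × Int)) :
    reqScan (k : Int) flat 0 =
      (match scan01 k (flat.map bit) 0 with
       | none => -1
       | some t => match flat[t]? with | some p => p.2 + 1 | none => -1) := by
  have h := reqScan_eq_scan01 k hk flat 0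
  simpa using h

theorem unchanged_main (seatAmount : Int) (seats : List (List (List String)))
    (hnd : ¬ (seatAmount = 0 ∧ (seats.all (fun row => row.all (fun sub => sub.all (fun s => s == "E")))) = false)) :
    RequestSeats seatAmount seats = RequestSeats_alt seatAmount seats := by
  unfold RequestSeats RequestSeats_alt
  rw [← reqI_scan]
  rcases lt_trichotomy seatAmount 0 with hneg | hzero | hpos
  · rw [if_pos (le_of_lt hneg)]
    exact reqScan_neg _ hneg _ 0 le_rfl
  · subst hzero
    rw [if_pos le_rfl]
    have hall : (seats.all (fun row => row.all (fun sub => sub.all (fun s => s == "E")))) = true := by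
      rcases Bool.eq_false_or_eq_true (seats.all (fun row => row.all (fun sub => sub.all (fun s => s == "E")))) with h | h
      · exact h
      · exact absurd ⟨rfl, h⟩ hnd
    exact reqScan_allE _ (allE_of_all seats hall) 0 le_rfl
  · set k := seatAmount.toNat with hkdef
    have hsa : seatAmount = (k : Int) := by omega
    have hk1 : 0 < k := by omega
    rw [hsa, if_neg (by omega)]
    show reqScan ((k : Nat) : Int) (flatOf seats 0) 0
      = (if ((k : Nat) : Int) > (((bBits seats).length : Nat) : Int) then -1
         else if PySem.Chars.find (bBits seats) (List.replicate k '1') = -1 then -1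
         else bRowOf seats 0 (PySem.Chars.find (bBits seats) (List.replicate k '1') + ((k : Nat) : Int) - 1))
    rw [reqScan_eq_scan01_zero k hk1 (flatOf seats 0)]
    rw [flatOf_map_bit seats 0]
    rw [scan01_find k hk1 (bBits seats) 0 hk1]
    simp only [List.replicate_zero, List.nil_append, Nat.sub_zero]
    by_cases hbig : ((k : Int) > ((bBits seats).length : Int))
    · rw [if_pos hbig]
      have hfneg : PySem.Chars.find (bBits seats) (List.replicate k '1') = -1 := by
        rw [PySem.Chars.find_eq_neg_one_iff]
        intro h
        have := h.sublist.length_le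
        simp at this
        omega
      rw [if_pos hfneg]
    · rw [if_neg hbig]
      by_cases hf : PySem.Chars.find (bBits seats) (List.replicate k '1') = -1
      · rw [if_pos hf, if_pos hf]
      · rw [if_neg hf, if_neg hf]
        have h0 : 0 ≤ PySem.Chars.find (bBits seats) (List.replicate k '1') := by
          have := PySem.Chars.neg_one_le_find (bBits seats) (List.replicate k '1')
          omega
        obtain ⟨hp, -⟩ := PySem.Chars.find_spec (s := bBits seats) (sub := List.replicate k '1') h0
        have hbound : (PySem.Chars.find (bBits seats) (List.replicate k '1')).toNat + k ≤ (bBits seats).length := by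
          have h1 := hp.length_le
          rw [List.length_drop, List.length_replicate] at h1
          omega
        have hlen : (flatOf seats 0).length = (bBits seats).length := by
          rw [← flatOf_map_bit seats 0]
          simp
        have ht : (PySem.Chars.find (bBits seats) (List.replicate k '1')).toNat + k - 1 < (flatOf seats 0).length := by
          omega
        show (match (flatOf seats 0)[(PySem.Chars.find (bBits seats) (List.replicate k '1')).toNat + k - 1]? with
              | some p => p.2 + 1
              | none => -1)
          = bRowOf seats 0 (PySem.Chars.find (bBits seats) (List.replicate k '1') + (k : Int) - 1)
        rw [← bRowOf_eq seats 0 _ ht]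
        congr 1
        omega

theorem tight_main (seatAmount : Int) (seats : List (List (List String)))
    (hd : seatAmount = 0 ∧ (seats.all (fun row => row.all (fun sub => sub.all (fun s => s == "E")))) = false) :
    RequestSeats seatAmount seats ≠ RequestSeats_alt seatAmount seats := by
  obtain ⟨rfl, hfalse⟩ := hd
  unfold RequestSeats RequestSeats_alt
  rw [← reqI_scan, if_pos le_rfl]
  have hge := reqScan_zero_hit (flatOf seats 0)
    (fun p hp => flatOf_snd_ge seats 0 p hp)
    (exE_of_not_all seats hfalse) 0 le_rfl
  omega

-- ===== VERDICT (by name: the statements are the Claim_ definitions above) =====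
theorem RequestSeats_spec : Claim_unchanged_RequestSeats := by
  intro seatAmount seats _ hnd
  unfold D_RequestSeats at hnd
  exact unchanged_main seatAmount seats hnd

theorem RequestSeats_changed : Claim_changed_RequestSeats := by
  unfold Claim_changed_RequestSeats; decide

theorem RequestSeats_tight : Claim_exact_RequestSeats := by
  intro seatAmount seats _ hd
  unfold D_RequestSeats at hd
  exact tight_main seatAmount seats hd
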